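-- pv_equiv track=rewrite | github.com/cli3267/CS115 | life.py | innerCells
-- ===== SOURCE A (Python) =====
-- def createBoard(width, height):
--     """ returns a 2d array with "height" rows and "width" cols """
--     A = []
--     for row in range(height):
--         A += [int(width) * [0]]
--     return A
--
-- def innerCells(w,h):
--     A = createBoard(w,h)
--     for row in range(h-1):
--         for col in range(w-1):
--             if row == 0 or col == 0:
--                 A[row][col] = 0
--             else:
--                 A[row][col] = 1
--     return A
-- ===== SOURCE B (Python) =====
-- def innerCells(w, h):
--     return [[1 if (0 < row < h - 1 and 0 < col < w - 1) else 0
--              for col in range(w)]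
--             for row in range(h)]
-- ===== Notes on version B (the rewrite author's own statement) =====
-- stated objective: simpler
-- what changed: Collapses A's two passes (allocate an all-zero board, then overwrite a subregion cell by cell) into a single nested comprehension that computes each cell's final value directly from its coordinates.
import Mathlib
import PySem

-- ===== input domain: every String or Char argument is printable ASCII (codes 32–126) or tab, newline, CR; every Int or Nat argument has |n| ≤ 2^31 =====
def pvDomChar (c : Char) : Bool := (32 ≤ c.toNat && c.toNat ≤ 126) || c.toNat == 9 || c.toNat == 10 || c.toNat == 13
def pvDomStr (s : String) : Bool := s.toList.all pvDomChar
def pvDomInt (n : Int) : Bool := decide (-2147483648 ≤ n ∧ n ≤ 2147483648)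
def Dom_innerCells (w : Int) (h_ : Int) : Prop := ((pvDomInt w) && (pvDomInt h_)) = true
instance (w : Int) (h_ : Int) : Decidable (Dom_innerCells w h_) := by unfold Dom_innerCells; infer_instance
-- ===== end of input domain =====

-- B replaces A's two passes (zero board, then overwrite the interior) by one nested
-- comprehension computing each cell directly; objective: simpler.

-- ===== PORT A =====
-- Python 'A[row][col] = v': both indices here are nonnegative (they come from range),
-- and whenever the write is reached they are in range, where List.set is exact.
def pySet2 (A : List (List Int)) (r c : Int) (v : Int) : List (List Int) :=
  A.set r.toNat ((A.getD r.toNat []).set c.toNat v)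

-- 'int(width) * [0]': Python list repetition gives [] for width ≤ 0, exactly List.replicate width.toNat
def createBoard (width height : Int) : List (List Int) :=
  (PySem.List.pyRange 0 height 1).foldl (fun A _ => A ++ [List.replicate width.toNat (0 : Int)]) []

def innerCells (w : Int) (h_ : Int) : List (List Int) :=
  (PySem.List.pyRange 0 (h_ - 1) 1).foldl (fun A row =>
    (PySem.List.pyRange 0 (w - 1) 1).foldl (fun A col =>
      if row == 0 || col == 0 then pySet2 A row col 0 else pySet2 A row col 1) A)
    (createBoard w h_)

-- ===== PORT B =====
def innerCells_alt (w : Int) (h_ : Int) : List (List Int) :=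
  (PySem.List.pyRange 0 h_ 1).map (fun row =>
    (PySem.List.pyRange 0 w 1).map (fun col =>
      if 0 < row ∧ row < h_ - 1 ∧ 0 < col ∧ col < w - 1 then (1 : Int) else 0))

-- ===== PRECONDITION & SPEC =====
def Spec_innerCells (w : Int) (h_ : Int) (out : List (List Int)) : Prop := out = innerCells_alt w h_
instance (w : Int) (h_ : Int) (out : List (List Int)) : Decidable (Spec_innerCells w h_ out) := by unfold Spec_innerCells; infer_instance

-- ===== CLAIM (what is proved, stated in full; the proofs are below) =====
def Claim_equal_innerCells : Prop := ∀ (w : Int) (h_ : Int), Dom_innerCells w h_ → Spec_innerCells w h_ (innerCells w h_)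

-- ===== LEMMAS AND PROOFS =====

theorem foldl_append_const {α β : Type} (x : α) (l : List β) (init : List α) :
    l.foldl (fun A _ => A ++ [x]) init = init ++ List.replicate l.length x := by
  induction l generalizing init with
  | nil => simp
  | cons b bs ih =>
    rw [List.foldl_cons, ih, List.length_cons, List.append_assoc]
    rfl

theorem createBoard_eq (w h_ : Int) :
    createBoard w h_ = List.replicate h_.toNat (List.replicate w.toNat (0 : Int)) := by
  rw [createBoard, foldl_append_const, PySem.List.length_pyRange_one]
  simp

-- pull the branch inside the write
theorem pySet2_ite (b : Bool) (A : List (List Int)) (r c : Int) :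
    (if b then pySet2 A r c 0 else pySet2 A r c 1) = pySet2 A r c (if b then 0 else 1) := by
  cases b <;> rfl

theorem set_getD_self {α : Type} (A : List α) (n : Nat) (e : α) :
    A.set n (A.getD n e) = A := by
  by_cases h : n < A.length
  · rw [List.getD_eq_getElem _ _ h, List.set_getElem_self]
  · rw [List.set_eq_of_length_le (by omega)]

-- the whole-board inner fold acts only on row r
theorem foldl_pySet2_row (r : Int) (v : Int → Int) (cs : List Int) (A : List (List Int)) :
    cs.foldl (fun A c => pySet2 A r c (v c)) A
      = A.set r.toNat (cs.foldl (fun L c => L.set c.toNat (v c)) (A.getD r.toNat [])) := by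
  induction cs generalizing A with
  | nil => rw [List.foldl_nil, List.foldl_nil, set_getD_self]
  | cons c cs ih =>
    rw [List.foldl_cons, ih, List.foldl_cons]
    by_cases hr : r.toNat < A.length
    · rw [pySet2, List.set_set]
      congr 2
      rw [List.getD_eq_getElem _ _ (by simpa using hr), List.getElem_set_self,
        List.getD_eq_getElem _ _ hr]
    · have hA : pySet2 A r c (v c) = A := by
        rw [pySet2, List.set_eq_of_length_le (by omega)]
      rw [hA, List.getD_eq_default _ _ (by omega)]
      simp

-- one-touch-per-index fold over range starting from a constant board
theorem foldl_range_set {α : Type} (F : Nat → α → α) (d e : α) (m n : Nat) :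
    (List.range m).foldl (fun L i => L.set i (F i (L.getD i e))) (List.replicate n d)
      = (List.range n).map (fun i => if i < m then F i d else d) := by
  induction m with
  | zero => simp [List.map_const']
  | succ m ih =>
    rw [List.range_succ, List.foldl_append, ih, List.foldl_cons, List.foldl_nil]
    by_cases hm : m < n
    · have hlen : m < ((List.range n).map (fun i => if i < m then F i d else d)).length := by
        simpa using hm
      rw [List.getD_eq_getElem _ _ hlen]
      apply List.ext_getElem
      · simp
      · intro i h1 h2
        simp only [List.getElem_set, List.getElem_map, List.getElem_range]
        by_cases hi : m = i
        · subst hi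
          simp
        · simp only [if_neg hi]
          split_ifs with h3 h4 <;> first | rfl | omega
    · rw [List.set_eq_of_length_le (by simpa using (by omega : n ≤ m))]
      apply List.map_congr_left
      intro i hi
      rw [List.mem_range] at hi
      split_ifs <;> first | rfl | omega

-- specialisation: the written value does not depend on the old one
theorem foldl_range_set_const {α : Type} (f : Nat → α) (d : α) (m n : Nat) :
    (List.range m).foldl (fun L i => L.set i (f i)) (List.replicate n d)
      = (List.range n).map (fun i => if i < m then f i else d) :=
  foldl_range_set (fun i _ => f i) d d m n

theorem pyRange_zero_toNat (b : Int) :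
    PySem.List.pyRange 0 b 1 = (List.range b.toNat).map (fun k : Nat => (k : Int)) := by
  rw [PySem.List.pyRange_one]; simp

-- ===== VERDICT (by name: the statement is the Claim_ definition above) =====
theorem foldl_set_pyRange (b : Int) (v : Int → Int) (n : Nat) (d : Int) :
    (PySem.List.pyRange 0 b 1).foldl (fun L c => L.set c.toNat (v c)) (List.replicate n d)
      = (List.range n).map (fun j => if j < b.toNat then v (j : Int) else d) := by
  rw [pyRange_zero_toNat, List.foldl_map]
  simp only [Int.toNat_natCast]
  exact foldl_range_set_const (fun j => v (j : Int)) d b.toNat n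

theorem innerCells_eq_alt (w h_ : Int) : innerCells w h_ = innerCells_alt w h_ := by
  unfold innerCells innerCells_alt
  rw [createBoard_eq]
  simp only [pySet2_ite]
  have hstep : (fun (A : List (List Int)) (row : Int) =>
      (PySem.List.pyRange 0 (w - 1) 1).foldl
        (fun A col => pySet2 A row col (if row == 0 || col == 0 then (0 : Int) else 1)) A)
    = (fun (A : List (List Int)) (row : Int) =>
      A.set row.toNat ((PySem.List.pyRange 0 (w - 1) 1).foldl
        (fun L col => L.set col.toNat (if row == 0 || col == 0 then (0 : Int) else 1))
        (A.getD row.toNat []))) := by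
    funext A row
    exact foldl_pySet2_row row (fun col => if row == 0 || col == 0 then (0 : Int) else 1) _ A
  rw [hstep, pyRange_zero_toNat (h_ - 1), List.foldl_map]
  simp only [Int.toNat_natCast]
  refine (foldl_range_set
      (fun (k : Nat) (L : List Int) =>
        (PySem.List.pyRange 0 (w - 1) 1).foldl
          (fun L col => L.set col.toNat (if (k : Int) == 0 || col == 0 then (0 : Int) else 1)) L)
      (List.replicate w.toNat 0) [] (h_ - 1).toNat h_.toNat).trans ?_
  rw [pyRange_zero_toNat h_, List.map_map]
  apply List.map_congr_left
  intro i hi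
  rw [List.mem_range] at hi
  by_cases hrow : i < (h_ - 1).toNat
  · rw [if_pos hrow, foldl_set_pyRange, pyRange_zero_toNat w, Function.comp_apply, List.map_map]
    apply List.map_congr_left
    intro j hj
    rw [List.mem_range] at hj
    simp only [Function.comp_apply, beq_iff_eq, Bool.or_eq_true]
    split_ifs <;> omega
  · rw [if_neg hrow, Function.comp_apply, pyRange_zero_toNat w, List.map_map]
    have : ∀ j ∈ List.range w.toNat,
        ((fun col => if 0 < (i : Int) ∧ (i : Int) < h_ - 1 ∧ 0 < col ∧ col < w - 1
            then (1 : Int) else 0) ∘ (fun k : Nat => (k : Int))) j = (fun _ => (0 : Int)) j := by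
      intro j hj
      simp only [Function.comp_apply]
      rw [if_neg (by omega)]
    rw [List.map_congr_left this, List.map_const']
    simp

theorem innerCells_spec : Claim_equal_innerCells := by
  intro w h_ _
  unfold Spec_innerCells
  exact innerCells_eq_alt w h_
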